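-- pv_equiv track=rewrite | github.com/mattiagatti/SKINPAN | show_samples.py | _parse_specific_ids
-- ===== SOURCE A (Python) =====
-- from typing import Iterable, List, Optional
--
-- def _parse_specific_ids(values: Optional[Iterable[str]]) -> List[int]:
--     """Parse a list of ids from CLI. Accepts forms like:
--     --specific-ids 12 34 56
--     --specific-ids 12,34,56
--     --specific-ids 12 34,56 78
--     Returns a deduplicated list of ints preserving order.
--     """
--     if not values:
--         return []
--     seen = set()
--     out: List[int] = []
--     for v in values:
--         for tok in str(v).replace(";", ",").split(","):
--             tok = tok.strip()
--             if not tok: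
--                 continue
--             try:
--                 i = int(tok)
--             except ValueError:
--                 continue
--             if i not in seen:
--                 seen.add(i)
--                 out.append(i)
--     return out
-- ===== SOURCE B (Python) =====
-- from typing import Iterable, List, Optional
--
-- def _parse_specific_ids(values: Optional[Iterable[str]]) -> List[int]:
--     if not values:
--         return []
--     # pass 1: flat list of stripped tokens
--     toks = [t.strip() for v in values for t in str(v).replace(";", ",").split(",")]
--     # pass 2: index each id by the position of its first occurrence
--     first = {}
--     for pos, tok in enumerate(toks):
--         if not tok:
--             continue
--         try:
--             i = int(tok)
--         except ValueError:
--             continue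
--         first.setdefault(i, pos)
--     # pass 3: emit ids ordered by first-occurrence position
--     return [i for i, _ in sorted(first.items(), key=lambda item: item[1])]
-- ===== Notes on version B (the rewrite author's own statement) =====
-- stated objective: alternative
-- what changed: A dedups online inside one nested loop with a seen-set and ordered appends; B runs three staged passes: flatten all values into a stripped token list, build a dict mapping each parsed id to its first-occurrence position via setdefault, then sort the dict items by position and emit the keys.
import Mathlib
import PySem

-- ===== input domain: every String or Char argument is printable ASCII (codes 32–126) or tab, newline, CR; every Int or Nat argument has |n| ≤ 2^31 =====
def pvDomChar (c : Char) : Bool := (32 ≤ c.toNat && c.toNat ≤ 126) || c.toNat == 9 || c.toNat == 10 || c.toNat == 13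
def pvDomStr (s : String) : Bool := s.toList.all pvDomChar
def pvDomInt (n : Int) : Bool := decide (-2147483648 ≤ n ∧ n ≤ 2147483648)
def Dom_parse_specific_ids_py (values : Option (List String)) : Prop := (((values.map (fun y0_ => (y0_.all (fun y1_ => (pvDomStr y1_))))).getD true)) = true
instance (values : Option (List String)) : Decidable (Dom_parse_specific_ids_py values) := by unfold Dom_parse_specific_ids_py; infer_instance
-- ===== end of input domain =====

-- B replaces A's online seen-set dedup inside one nested loop by three staged passes:
-- flatten to a stripped token list, index each id by its first-occurrence position with
-- dict.setdefault, then sort the items by position and emit the keys. Same result, O(n log n).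

-- ===== PORT A =====
-- A: one nested loop with a `seen` set and an `out` list, appending only unseen ints.
-- (split(",") with the nonempty literal separator: split? never returns none here, getD [] is exact)
def parse_specific_ids_py (values : Option (List String)) : List Int :=
  match values with
  | none => []
  | some vs =>
    if vs = [] then []
    else
      let st : PySem.Set Int × List Int := ([], [])
      let st := vs.foldl (fun st v =>
        (((PySem.Str.split? (PySem.Str.replace v ";" ",") ",").getD []).foldl
          (fun (st : PySem.Set Int × List Int) tok =>
            let tok := PySem.Str.strip tok
            if tok = "" then st
            else
              match PySem.Int.ofStr? tok with
              | none => st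
              | some i =>
                if PySem.Set.contains st.1 i then st
                else (PySem.Set.add st.1 i, st.2 ++ [i])) st)) st
      st.2

-- ===== PORT B =====
-- B pass 1: flat list of stripped tokens; pass 2: first-occurrence-position dict via
-- setdefault; pass 3: sort items by position, emit keys.
def parse_specific_ids_py_alt (values : Option (List String)) : List Int :=
  match values with
  | none => []
  | some vs =>
    if vs = [] then []
    else
      let toks := vs.flatMap (fun v =>
        ((PySem.Str.split? (PySem.Str.replace v ";" ",") ",").getD []).map PySem.Str.strip)
      let first := (PySem.List.enumerate toks).foldl
        (fun (d : PySem.Dict Int Int) pt =>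
          if pt.2 = "" then d
          else
            match PySem.Int.ofStr? pt.2 with
            | none => d
            | some i => d.setdefault i pt.1) PySem.Dict.empty
      (PySem.List.sorted first.items (fun item => item.2) false).map (·.1)

-- ===== PRECONDITION & SPEC =====
def Spec_parse_specific_ids_py (values : Option (List String)) (out : List Int) : Prop := out = parse_specific_ids_py_alt values
instance (values : Option (List String)) (out : List Int) : Decidable (Spec_parse_specific_ids_py values out) := by unfold Spec_parse_specific_ids_py; infer_instance

-- ===== CLAIM (what is proved, stated in full; the proofs are below) =====
def Claim_equal_parse_specific_ids_py : Prop := ∀ (values : Option (List String)), Dom_parse_specific_ids_py values → Spec_parse_specific_ids_py values (parse_specific_ids_py values)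

-- ===== LEMMAS AND PROOFS =====

-- proof-side names for the loop bodies (definitionally equal to the ports' lambdas)
def pvStepA (st : PySem.Set Int × List Int) (tok : String) : PySem.Set Int × List Int :=
  let tok := PySem.Str.strip tok
  if tok = "" then st
  else
    match PySem.Int.ofStr? tok with
    | none => st
    | some i =>
      if PySem.Set.contains st.1 i then st
      else (PySem.Set.add st.1 i, st.2 ++ [i])

def pvStepB (d : PySem.Dict Int Int) (pt : Int × String) : PySem.Dict Int Int :=
  if pt.2 = "" then d
  else
    match PySem.Int.ofStr? pt.2 with
    | none => d
    | some i => d.setdefault i pt.1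

-- the int one RAW token contributes in A (strip, skip empty, int() or skip)
def pvParse? (tok : String) : Option Int :=
  if PySem.Str.strip tok = "" then none else PySem.Int.ofStr? (PySem.Str.strip tok)

-- the int one ALREADY-STRIPPED token contributes in B's pass 2
def pvParseS (tok : String) : Option Int :=
  if tok = "" then none else PySem.Int.ofStr? tok

def pvToks (v : String) : List String :=
  (PySem.Str.split? (PySem.Str.replace v ";" ",") ",").getD []

theorem pvInnerA (toks : List String) (s : PySem.Set Int) :
    toks.foldl pvStepA (s, s)
    = (PySem.Set.update s (toks.filterMap pvParse?),
       PySem.Set.update s (toks.filterMap pvParse?)) := by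
  induction toks generalizing s with
  | nil => simp [PySem.Set.update]
  | cons t ts ih =>
    rw [List.foldl_cons, List.filterMap_cons]
    by_cases h : PySem.Str.strip t = ""
    · have hs : pvStepA (s, s) t = (s, s) := by simp [pvStepA, h]
      have hp' : pvParse? t = none := by simp [pvParse?, h]
      rw [hs, hp', ih]
    · cases hp : PySem.Int.ofStr? (PySem.Str.strip t) with
      | none =>
        have hs : pvStepA (s, s) t = (s, s) := by simp [pvStepA, h, hp]
        have hp' : pvParse? t = none := by simp [pvParse?, h, hp]
        rw [hs, hp', ih]
      | some i =>
        have hp' : pvParse? t = some i := by simp [pvParse?, h, hp]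
        have hs : pvStepA (s, s) t = (PySem.Set.add s i, PySem.Set.add s i) := by
          by_cases hc : i ∈ s
          · simp [pvStepA, h, hp, hc]
          · simp [pvStepA, h, hp, hc, PySem.Set.add]
        have hupd : ∀ L, PySem.Set.update s (i :: L)
            = PySem.Set.update (PySem.Set.add s i) L := fun _ => rfl
        rw [hs, hp', ih, hupd]

theorem pvOuterA (vs : List String) (s : PySem.Set Int) :
    vs.foldl (fun st v => (pvToks v).foldl pvStepA st) (s, s)
    = (PySem.Set.update s (vs.flatMap (fun v => (pvToks v).filterMap pvParse?)),
       PySem.Set.update s (vs.flatMap (fun v => (pvToks v).filterMap pvParse?))) := by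
  induction vs generalizing s with
  | nil => simp [PySem.Set.update]
  | cons v vs ih =>
    rw [List.foldl_cons, List.flatMap_cons, pvInnerA, ih]
    have : ∀ L M, PySem.Set.update s (L ++ M)
        = PySem.Set.update (PySem.Set.update s L) M := by
      intro L M; simp [PySem.Set.update, List.foldl_append]
    rw [this]

-- B's pass-2 fold: the keys evolve exactly as a PySem.Set fed the parsed ints
theorem pvFoldB_keys (ps : List (Int × String)) (d : PySem.Dict Int Int) :
    (ps.foldl pvStepB d).keys
      = PySem.Set.update d.keys (ps.filterMap (fun pt => pvParseS pt.2)) := by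
  induction ps generalizing d with
  | nil => simp [PySem.Set.update]
  | cons pt ps ih =>
    rw [List.foldl_cons, List.filterMap_cons]
    by_cases h : pt.2 = ""
    · have hs : pvStepB d pt = d := by simp [pvStepB, h]
      have hp : pvParseS pt.2 = none := by simp [pvParseS, h]
      rw [hs, hp, ih]
    · cases hp : PySem.Int.ofStr? pt.2 with
      | none =>
        have hs : pvStepB d pt = d := by simp [pvStepB, h, hp]
        have hp' : pvParseS pt.2 = none := by simp [pvParseS, h, hp]
        rw [hs, hp', ih]
      | some i =>
        have hp' : pvParseS pt.2 = some i := by simp [pvParseS, h, hp]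
        have hupd : ∀ (s : PySem.Set Int) L, PySem.Set.update s (i :: L)
            = PySem.Set.update (PySem.Set.add s i) L := fun _ _ => rfl
        by_cases hc : d.contains i = true
        · have hs : pvStepB d pt = d := by
            simp [pvStepB, h, hp, PySem.Dict.setdefault_of_contains d pt.1 hc]
          have hk : PySem.Set.add d.keys i = d.keys := by
            have : i ∈ d.keys := (PySem.Dict.contains_iff_mem_keys d i).mp hc
            simp [PySem.Set.add, this]
          rw [hs, hp', ih, hupd, hk]
        · have hc' : d.contains i = false := by simpa using hc
          have hs : pvStepB d pt = d.insert i pt.1 := by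
            simp [pvStepB, h, hp, PySem.Dict.setdefault_of_not_contains d pt.1 hc']
          have hm : i ∉ d.keys := fun hmem =>
            (by simp [hc'] : ¬ d.contains i = true)
              ((PySem.Dict.contains_iff_mem_keys d i).mpr hmem)
          have hk : (d.insert i pt.1).keys = PySem.Set.add d.keys i := by
            rw [PySem.Dict.keys_insert_of_not_contains d pt.1 hc']
            simp [PySem.Set.add, hm]
          rw [hs, hp', ih, hupd, hk]

-- B's pass-2 fold over enumerated tokens: positions stored stay < the running index
-- and strictly increase along the items list
theorem pvFoldB_snd (toks : List String) (s : Int) (d : PySem.Dict Int Int)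
    (hb : ∀ p ∈ d.items, p.2 < s)
    (hpw : (d.items.map (·.2)).Pairwise (· < ·)) :
    (∀ p ∈ ((PySem.List.enumerate toks s).foldl pvStepB d).items, p.2 < s + toks.length)
    ∧ ((((PySem.List.enumerate toks s).foldl pvStepB d).items.map (·.2)).Pairwise (· < ·)) := by
  induction toks generalizing s d with
  | nil =>
    rw [PySem.List.enumerate_nil, List.foldl_nil]
    exact ⟨fun p hp => by
      have := hb p hp
      simp only [List.length_nil, Nat.cast_zero, add_zero]
      exact this, hpw⟩
  | cons t ts ih =>
    rw [PySem.List.enumerate_cons, List.foldl_cons]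
    have hstep : ∀ (d' : PySem.Dict Int Int),
        (∀ p ∈ d'.items, p.2 < s + 1) → ((d'.items.map (·.2)).Pairwise (· < ·)) →
        (∀ p ∈ ((PySem.List.enumerate ts (s + 1)).foldl pvStepB d').items,
            p.2 < s + 1 + ts.length)
        ∧ ((((PySem.List.enumerate ts (s + 1)).foldl pvStepB d').items.map (·.2)).Pairwise (· < ·)) :=
      fun d' h1 h2 => ih (s + 1) d' h1 h2
    have hlen : s + (t :: ts).length = s + 1 + ts.length := by
      push_cast [List.length_cons]; omega
    rw [hlen]
    have hb1 : ∀ p ∈ d.items, p.2 < s + 1 := fun p hp => by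
      have := hb p hp; omega
    by_cases h : t = ""
    · have hs : pvStepB d (s, t) = d := by simp [pvStepB, h]
      rw [hs]; exact hstep d hb1 hpw
    · cases hp : PySem.Int.ofStr? t with
      | none =>
        have hs : pvStepB d (s, t) = d := by simp [pvStepB, h, hp]
        rw [hs]; exact hstep d hb1 hpw
      | some i =>
        by_cases hc : d.contains i = true
        · have hs : pvStepB d (s, t) = d := by
            simp [pvStepB, h, hp, PySem.Dict.setdefault_of_contains d s hc]
          rw [hs]; exact hstep d hb1 hpw
        · have hc' : d.contains i = false := by simpa using hc
          have hs : pvStepB d (s, t) = d.insert i s := by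
            simp [pvStepB, h, hp, PySem.Dict.setdefault_of_not_contains d s hc']
          have hitems : (d.insert i s).items = d.items ++ [(i, s)] :=
            PySem.Dict.items_insert_of_not_contains d s hc'
          have hb' : ∀ p ∈ (d.insert i s).items, p.2 < s + 1 := by
            intro p hpmem
            rw [hitems, List.mem_append] at hpmem
            rcases hpmem with hmem | hmem
            · have := hb p hmem; omega
            · simp at hmem; subst hmem; omega
          have hpw' : ((d.insert i s).items.map (·.2)).Pairwise (· < ·) := by
            rw [hitems, List.map_append]
            refine List.pairwise_append.mpr ⟨hpw, by simp, ?_⟩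
            intro x hx y hy
            simp at hy; subst hy
            rcases List.mem_map.mp hx with ⟨p, hpmem, rfl⟩
            exact hb p hpmem
          rw [hs]; exact hstep (d.insert i s) hb' hpw'

-- ===== VERDICT (by name: the statement is the Claim_ definition above) =====
theorem parse_specific_ids_py_spec : Claim_equal_parse_specific_ids_py := by
  intro values _
  unfold Spec_parse_specific_ids_py parse_specific_ids_py parse_specific_ids_py_alt
  match values with
  | none => rfl
  | some vs =>
    by_cases h : vs = []
    · simp [h]
    · simp only [h, if_false]
      -- name the two loop bodies
      have hba : (fun (st : PySem.Set Int × List Int) v =>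
          (((PySem.Str.split? (PySem.Str.replace v ";" ",") ",").getD []).foldl
            (fun (st : PySem.Set Int × List Int) tok =>
              let tok := PySem.Str.strip tok
              if tok = "" then st
              else
                match PySem.Int.ofStr? tok with
                | none => st
                | some i =>
                  if PySem.Set.contains st.1 i then st
                  else (PySem.Set.add st.1 i, st.2 ++ [i])) st))
          = (fun st v => (pvToks v).foldl pvStepA st) := rfl
      have hbb : (fun (d : PySem.Dict Int Int) (pt : Int × String) =>
          if pt.2 = "" then d
          else
            match PySem.Int.ofStr? pt.2 with
            | none => d
            | some i => d.setdefault i pt.1) = pvStepB := rfl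
      rw [hba, hbb, pvOuterA]
      have htoks' : (fun v => List.map PySem.Str.strip
            ((PySem.Str.split? (PySem.Str.replace v ";" ",") ",").getD []))
          = (fun v => (pvToks v).map PySem.Str.strip) := rfl
      rw [htoks']
      set toks := vs.flatMap (fun v => (pvToks v).map PySem.Str.strip) with htoks
      set dfin := List.foldl pvStepB PySem.Dict.empty (PySem.List.enumerate toks) with hdfin
      -- the parsed ints, once and for all
      have hparsed : (PySem.List.enumerate toks).filterMap (fun pt => pvParseS pt.2)
          = vs.flatMap (fun v => (pvToks v).filterMap pvParse?) := by
        have h1 : (PySem.List.enumerate toks).filterMap (fun pt => pvParseS pt.2)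
            = ((PySem.List.enumerate toks).map (·.2)).filterMap pvParseS := by
          rw [List.filterMap_map]; rfl
        rw [h1, PySem.List.map_snd_enumerate, htoks, List.filterMap_flatMap]
        refine List.flatMap_congr (fun v _ => ?_)
        rw [List.filterMap_map]
        rfl
      -- keys of the final dict
      have hkeys : dfin.keys = PySem.Set.update ([] : PySem.Set Int)
          (vs.flatMap (fun v => (pvToks v).filterMap pvParse?)) := by
        rw [hdfin, pvFoldB_keys, hparsed]
        rfl
      -- positions strictly increase along the items list
      have hsnd := pvFoldB_snd toks 0 PySem.Dict.empty (by simp [PySem.Dict.empty])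
        (by simp [PySem.Dict.empty])
      have hpw2 : dfin.items.Pairwise (fun a b => a.2 ≤ b.2) := by
        have h2 := hsnd.2
        rw [List.pairwise_map] at h2
        exact h2.imp (fun h => le_of_lt h)
      -- sorting by position is the identity
      have hsorted := PySem.List.sorted_eq_self_of_pairwise dfin.items
        (fun item => item.2) hpw2
      show PySem.Set.update ([] : PySem.Set Int)
          (vs.flatMap (fun v => (pvToks v).filterMap pvParse?))
        = (PySem.List.sorted dfin.items (fun item => item.2)).map (·.1)
      rw [hsorted]
      have hmapfst : dfin.items.map (·.1) = dfin.keys := rfl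
      rw [hmapfst, hkeys]
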